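-- pv_equiv track=rewrite | github.com/M-Awwab-Khan/Competitive-Programming | gameOfDivision.py | gameOfDivision
-- ===== SOURCE A (Python) =====
-- def gameOfDivision(n, k, a):
--     modGroups = {}
--     for i in range(n):
--         modValue = a[i] % k
--         if modValue not in modGroups:
--             modGroups[modValue] = []
--         modGroups[modValue].append(i + 1)
--
--
--     for key in modGroups:
--         if len(modGroups[key]) == 1:
--             return "YES\n" + str(modGroups[key][0])
--     return "NO"
-- ===== SOURCE B (Python) =====
-- def gameOfDivision(n, k, a):
--     counts = {}
--     for i in range(n):
--         r = a[i] % k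
--         counts[r] = counts.get(r, 0) + 1
--     for i in range(n):
--         if counts[a[i] % k] == 1:
--             return "YES\n" + str(i + 1)
--     return "NO"
-- ===== Notes on version B (the rewrite author's own statement) =====
-- stated objective: simpler
-- what changed: B replaces the dict of per-remainder index lists and the scan over dict groups by a plain remainder-frequency count plus a second pass over the array itself, returning the first index whose remainder count is 1.
import Mathlib
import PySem

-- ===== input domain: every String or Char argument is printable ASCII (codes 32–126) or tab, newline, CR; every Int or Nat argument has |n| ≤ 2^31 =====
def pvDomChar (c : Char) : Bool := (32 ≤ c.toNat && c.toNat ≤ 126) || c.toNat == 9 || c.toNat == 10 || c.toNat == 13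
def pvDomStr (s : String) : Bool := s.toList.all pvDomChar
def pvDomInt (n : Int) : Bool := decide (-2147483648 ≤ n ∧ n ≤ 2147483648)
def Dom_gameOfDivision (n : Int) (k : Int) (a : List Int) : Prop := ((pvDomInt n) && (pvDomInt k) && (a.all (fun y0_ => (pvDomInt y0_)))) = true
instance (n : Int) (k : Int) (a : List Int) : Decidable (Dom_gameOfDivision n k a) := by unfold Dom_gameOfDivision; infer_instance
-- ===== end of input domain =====

-- B changes the decomposition: a remainder-frequency count plus a second pass over the
-- array, instead of A's dict of index lists scanned group by group (objective: simpler).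

-- ===== PORT A =====
-- the grouping loop of A: modGroups[a[i] % k].append(i + 1)
def pvGroupsA (n : Int) (k : Int) (a : List Int) : PySem.Dict Int (List Int) :=
  (PySem.List.pyRange 0 n 1).foldl (fun d i =>
    let mv := PySem.Int.mod (PySem.List.pyGetD a i 0) k
    let d' := if d.contains mv then d else d.insert mv ([] : List Int)
    d'.modify mv [] (fun g => g ++ [i + 1])) PySem.Dict.empty

-- A's second loop: for key in modGroups: if len == 1 return "YES\n"+str(group[0])
def pvScanA : List (Int × List Int) → String
  | [] => "NO"
  | (_, g) :: rest =>
      if g.length = 1 then "YES\n" ++ PySem.Int.toStr (PySem.List.pyGetD g 0 0)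
      else pvScanA rest

def gameOfDivision (n : Int) (k : Int) (a : List Int) : String :=
  pvScanA (pvGroupsA n k a).items

-- ===== PORT B =====
-- B's counting loop: counts[r] = counts.get(r, 0) + 1
def pvCountsB (n : Int) (k : Int) (a : List Int) : PySem.Dict Int Int :=
  (PySem.List.pyRange 0 n 1).foldl (fun d i =>
    let r := PySem.Int.mod (PySem.List.pyGetD a i 0) k
    d.insert r (d.getD r 0 + 1)) PySem.Dict.empty

-- B's second loop (counts[a[i] % k] always hits an existing key; getD is exact here)
def pvScanB (counts : PySem.Dict Int Int) (k : Int) (a : List Int) : List Int → String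
  | [] => "NO"
  | i :: rest =>
      if counts.getD (PySem.Int.mod (PySem.List.pyGetD a i 0) k) 0 = 1
      then "YES\n" ++ PySem.Int.toStr (i + 1)
      else pvScanB counts k a rest

def gameOfDivision_alt (n : Int) (k : Int) (a : List Int) : String :=
  pvScanB (pvCountsB n k a) k a (PySem.List.pyRange 0 n 1)

-- ===== PRECONDITION & SPEC =====
-- Pre_ excludes exactly the inputs where Python A raises: a[i] with i in range(n) needs
-- n ≤ len(a) (IndexError), and a[i] % k needs k ≠ 0 when the loop runs (ZeroDivisionError).
def Pre_gameOfDivision (n : Int) (k : Int) (a : List Int) : Prop :=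
  n ≤ (a.length : Int) ∧ (k ≠ 0 ∨ n ≤ 0)
instance (n : Int) (k : Int) (a : List Int) : Decidable (Pre_gameOfDivision n k a) := by
  unfold Pre_gameOfDivision; infer_instance

def pvWitness_gameOfDivision : Int × Int × List Int := (4, 3, [1, 2, 4, 5])

def Spec_gameOfDivision (n : Int) (k : Int) (a : List Int) (out : String) : Prop := out = gameOfDivision_alt n k a
instance (n : Int) (k : Int) (a : List Int) (out : String) : Decidable (Spec_gameOfDivision n k a out) := by unfold Spec_gameOfDivision; infer_instance

-- ===== CLAIM (what is proved, stated in full; the proofs are below) =====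
def Claim_equal_gameOfDivision : Prop := ∀ (n : Int) (k : Int) (a : List Int), Dom_gameOfDivision n k a → Pre_gameOfDivision n k a → Spec_gameOfDivision n k a (gameOfDivision n k a)

-- ===== LEMMAS AND PROOFS =====

-- proof-side definitions
def pvRm (k : Int) (a : List Int) (j : Nat) : Int := PySem.Int.mod ((a[j]?).getD 0) k
def pvRs (n k : Int) (a : List Int) : List Int := (List.range n.toNat).map (pvRm k a)

lemma pvCountsB_eq (n k : Int) (a : List Int) :
    pvCountsB n k a = PySem.Dict.counter (pvRs n k a) := by
  rw [← PySem.Dict.foldl_insert_getD_add_one_eq_counter]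
  unfold pvCountsB pvRs
  rw [PySem.List.pyRange_one, List.foldl_map, List.foldl_map]
  simp only [sub_zero]
  apply PySem.List.foldl_congr_mem
  intro acc j _
  simp [pvRm, PySem.List.pyGetD_natCast]

lemma pvGroupsA_eq (n k : Int) (a : List Int) :
    pvGroupsA n k a =
      ((List.range n.toNat).map (fun j => (pvRm k a j, (j : Int) + 1))).foldl
        (fun d p => d.modify p.1 [] (fun g => g ++ [p.2])) PySem.Dict.empty := by
  unfold pvGroupsA
  rw [PySem.List.pyRange_one, List.foldl_map, List.foldl_map]
  simp only [sub_zero]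
  apply PySem.List.foldl_congr_mem
  intro d j _
  have hmv : PySem.Int.mod (PySem.List.pyGetD a ((0 : Int) + (j : Int)) 0) k = pvRm k a j := by
    simp [pvRm, PySem.List.pyGetD_natCast]
  simp only [hmv]
  by_cases h : d.contains (pvRm k a j)
  · simp [h]
  · have h' : d.contains (pvRm k a j) = false := by simpa using h
    simp [h', PySem.Dict.modify, PySem.Dict.insert_insert_self,
      PySem.Dict.getD_insert_self, PySem.Dict.getD_of_not_contains d [] h']

lemma pv_find?_foldl_add (p : Int → Bool) :
    ∀ (rs acc : List Int), ((rs.foldl PySem.Set.add acc).find? p) = ((acc ++ rs).find? p) := by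
  intro rs
  induction rs with
  | nil => intro acc; simp
  | cons x t ih =>
    intro acc
    rw [List.foldl_cons, ih]
    by_cases hx : x ∈ acc
    · have hadd : PySem.Set.add acc x = acc := by
        simp [PySem.Set.add, PySem.Set.contains, hx]
      rw [hadd, List.find?_append, List.find?_append]
      cases hacc : acc.find? p with
      | some y => simp
      | none =>
        have hpx : p x = false := by
          have := List.find?_eq_none.mp hacc x hx
          simpa using this
        simp [hpx]
    · have hadd : PySem.Set.add acc x = acc ++ [x] := by
        simp [PySem.Set.add, PySem.Set.contains, hx]
      rw [hadd, List.append_assoc, List.singleton_append]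

lemma pv_find?_ofList (p : Int → Bool) (rs : List Int) :
    (PySem.Set.ofList rs).find? p = rs.find? p := by
  rw [PySem.Set.ofList_eq_foldl, pv_find?_foldl_add]
  rfl

lemma pv_find?_findIdx? (p : Int → Bool) :
    ∀ (rs : List Int) (x : Int), rs.find? p = some x →
      ∃ j, rs.findIdx? p = some j ∧ rs[j]? = some x := by
  intro rs
  induction rs with
  | nil => intro x h; simp at h
  | cons y t ih =>
    intro x h
    cases hy : p y with
    | true =>
      rw [List.find?_cons_of_pos hy] at h
      refine ⟨0, by simp [List.findIdx?_cons, hy], ?_⟩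
      simpa using h
    | false =>
      rw [List.find?_cons_of_neg (by simp [hy])] at h
      obtain ⟨j, hj1, hj2⟩ := ih x h
      exact ⟨j + 1, by simp [List.findIdx?_cons, hy, hj1], by simpa using hj2⟩

lemma pvScanA_find (G : Int → List Int) (ds : List Int) :
    pvScanA (ds.map (fun c => (c, G c))) =
      match ds.find? (fun c => (G c).length == 1) with
      | some c => "YES\n" ++ PySem.Int.toStr (PySem.List.pyGetD (G c) 0 0)
      | none => "NO" := by
  induction ds with
  | nil => rfl
  | cons c cs ih =>
    by_cases h : (G c).length = 1
    · rw [List.map_cons, List.find?_cons_of_pos (by simp [h])]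
      simp [pvScanA, h]
    · rw [List.map_cons, List.find?_cons_of_neg (by simp [h])]
      rw [← ih]
      simp [pvScanA, h]

lemma pvScanB_find (counts : PySem.Dict Int Int) (k : Int) (a : List Int) :
    ∀ (js : List Nat),
      pvScanB counts k a (List.map (fun (j : Nat) => (j : Int)) js) =
        match js.findIdx? (fun j => counts.getD (PySem.Int.mod ((a[j]?).getD 0) k) 0 == 1) with
        | some i => "YES\n" ++ PySem.Int.toStr ((js.getD i 0 : Int) + 1)
        | none => "NO" := by
  intro js
  induction js with
  | nil => rfl
  | cons j t ih =>
    by_cases h : counts.getD (PySem.Int.mod ((a[j]?).getD 0) k) 0 = 1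
    · rw [List.map_cons, List.findIdx?_cons]
      have hb : (counts.getD (PySem.Int.mod ((a[j]?).getD 0) k) 0 == 1) = true := by simp [h]
      rw [hb]
      simp [pvScanB, PySem.List.pyGetD_natCast, h]
    · rw [List.map_cons, List.findIdx?_cons]
      have hb : (counts.getD (PySem.Int.mod ((a[j]?).getD 0) k) 0 == 1) = false := by simp [h]
      rw [hb]
      have hstep : pvScanB counts k a (((j : Nat) : Int) :: List.map (fun (j : Nat) => (j : Int)) t) =
          pvScanB counts k a (List.map (fun (j : Nat) => (j : Int)) t) := by
        simp [pvScanB, PySem.List.pyGetD_natCast, h]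
      rw [hstep, ih]
      cases hf : t.findIdx? (fun j => counts.getD (PySem.Int.mod ((a[j]?).getD 0) k) 0 == 1) with
      | none => simp
      | some i => simp

lemma pvGroupsA_keys_nodup (n k : Int) (a : List Int) : (pvGroupsA n k a).keys.Nodup := by
  rw [pvGroupsA_eq]
  apply PySem.Dict.nodup_keys_foldl_modify_key
  simp [PySem.Dict.empty]

lemma pvGroupsA_keys (n k : Int) (a : List Int) :
    (pvGroupsA n k a).keys = PySem.Set.ofList (pvRs n k a) := by
  rw [pvGroupsA_eq, PySem.Dict.keys_foldl_modify_key, PySem.Set.ofList_eq_foldl]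
  simp only [List.map_map]
  rfl

lemma pvGroupsA_getD (n k : Int) (a : List Int) (c : Int) :
    (pvGroupsA n k a).getD c [] =
      ((List.range n.toNat).filter (fun j => pvRm k a j == c)).map (fun (j : Nat) => (j : Int) + 1) := by
  rw [pvGroupsA_eq, PySem.Dict.getD_foldl_modify_append]
  simp [List.filter_map, List.map_map, Function.comp_def]

lemma pvGroupsA_len (n k : Int) (a : List Int) (c : Int) :
    ((pvGroupsA n k a).getD c []).length = (pvRs n k a).count c := by
  rw [pvGroupsA_getD]
  simp [pvRs, List.count_eq_countP, List.countP_map, Function.comp_def, ← List.countP_eq_length_filter]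

lemma pv_main (n k : Int) (a : List Int) :
    gameOfDivision n k a = gameOfDivision_alt n k a := by
  unfold gameOfDivision gameOfDivision_alt
  have hrange : PySem.List.pyRange 0 n 1 = List.map (fun (j : Nat) => (j : Int)) (List.range n.toNat) := by
    rw [PySem.List.pyRange_one]
    simp
  rw [hrange, pvCountsB_eq, pvScanB_find]
  rw [PySem.Dict.items_eq_map_keys _ (pvGroupsA_keys_nodup n k a) ([] : List Int)]
  rw [pvGroupsA_keys]
  rw [pvScanA_find (fun c => (pvGroupsA n k a).getD c []) (PySem.Set.ofList (pvRs n k a))]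
  have hpred : (fun c => ((pvGroupsA n k a).getD c []).length == 1)
      = (fun x => (pvRs n k a).count x == 1) := by
    funext c; rw [pvGroupsA_len]
  rw [hpred, pv_find?_ofList]
  have hpredB : (fun j => (PySem.Dict.counter (pvRs n k a)).getD (PySem.Int.mod ((a[j]?).getD 0) k) 0 == 1)
      = (fun j => (pvRs n k a).count (pvRm k a j) == 1) := by
    funext j
    rw [PySem.Dict.getD_counter]
    simp [pvRm]
  rw [hpredB]
  have hIdx : (List.range n.toNat).findIdx? (fun j => (pvRs n k a).count (pvRm k a j) == 1)
      = (pvRs n k a).findIdx? (fun x => (pvRs n k a).count x == 1) := by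
    rw [pvRs, List.findIdx?_map]
    rfl
  cases hfind : (pvRs n k a).find? (fun x => (pvRs n k a).count x == 1) with
  | none =>
    have hnone : (List.range n.toNat).findIdx? (fun j => (pvRs n k a).count (pvRm k a j) == 1) = none := by
      rw [hIdx, List.findIdx?_eq_none_iff]
      intro x hx
      simpa using List.find?_eq_none.mp hfind x hx
    rw [hnone]
  | some x =>
    obtain ⟨j, hj, hjget⟩ := pv_find?_findIdx? _ _ _ hfind
    rw [hIdx, hj]
    have hcnt : (pvRs n k a).count x = 1 := by
      simpa using List.find?_some hfind
    have hjlt : j < n.toNat := by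
      by_contra hge
      rw [List.getElem?_eq_none (by simpa [pvRs] using Nat.le_of_not_lt hge)] at hjget
      simp at hjget
    have hx : pvRm k a j = x := by
      simp only [pvRs, List.getElem?_map, List.getElem?_range hjlt, Option.map_some] at hjget
      simpa using hjget
    have hflen : ((List.range n.toNat).filter (fun j' => pvRm k a j' == x)).length = 1 := by
      have hlen := pvGroupsA_len n k a x
      rw [pvGroupsA_getD, List.length_map] at hlen
      rw [hlen, hcnt]
    obtain ⟨b, hb⟩ := List.length_eq_one_iff.mp hflen
    have hjb : j = b := by
      have hmem : j ∈ (List.range n.toNat).filter (fun j' => pvRm k a j' == x) :=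
        List.mem_filter.mpr ⟨List.mem_range.mpr hjlt, by simp [hx]⟩
      rw [hb] at hmem
      simpa using hmem
    show "YES\n" ++ PySem.Int.toStr (PySem.List.pyGetD ((pvGroupsA n k a).getD x []) 0 0)
        = "YES\n" ++ PySem.Int.toStr (((List.range n.toNat).getD j 0 : Nat) + 1)
    rw [pvGroupsA_getD, hb, ← hjb]
    have hgd : (List.range n.toNat).getD j 0 = j := by
      simp [List.getD, List.getElem?_range hjlt]
    rw [hgd]
    simp [PySem.List.pyGetD_zero_cons]

-- ===== VERDICT (by name: the statement is the Claim_ definition above) =====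
theorem gameOfDivision_spec : Claim_equal_gameOfDivision := by
  intro n k a _ _
  unfold Spec_gameOfDivision
  exact pv_main n k a
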